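-- pv_equiv track=rewrite | github.com/sueszli/vector-database-benchmark | dataset/python-mutated/awsclient.py | _merge_s3_notification_config
-- ===== SOURCE A (Python) =====
-- from typing import Any, Optional, Dict, Callable, List, Iterator, Iterable, Sequence, IO, Tuple, Union
--
-- def _merge_s3_notification_config(existing_config: List[Dict[str, Any]], new_config: Dict[str, Any]) -> List[Dict[str, Any]]:
--     if False:
--         return 10
--     final_config = []
--     added_config = False
--     for config in existing_config:
--         if config['LambdaFunctionArn'] != new_config['LambdaFunctionArn']:
--             final_config.append(config)
--         else:
--             final_config.append(new_config)
--             added_config = True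
--     if not added_config:
--         final_config.append(new_config)
--     return final_config
-- ===== SOURCE B (Python) =====
-- def _merge_s3_notification_config(existing_config, new_config):
--     # Two-phase recursion: walk until the first ARN match; once matched,
--     # switch to a replace-only phase over the remainder. If the walk falls
--     # off the end without a match, the base case contributes [new_config].
--     def replace_rest(rest):
--         if not rest:
--             return []
--         head = rest[0]
--         kept = new_config if head['LambdaFunctionArn'] == new_config['LambdaFunctionArn'] else head
--         return [kept] + replace_rest(rest[1:])
--
--     def merge(rest):
--         if not rest:
--             return [new_config]
--         head = rest[0]
--         if head['LambdaFunctionArn'] == new_config['LambdaFunctionArn']: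
--             return [new_config] + replace_rest(rest[1:])
--         return [head] + merge(rest[1:])
--
--     return merge(existing_config)
-- ===== Notes on version B (the rewrite author's own statement) =====
-- stated objective: alternative
-- what changed: Replaces A's single fused loop with an added_config flag by a two-phase structural recursion: a search phase that appends new_config at the base case when no match is found, switching at the first matching ARN to a replace-only phase over the remainder (no flag, no post-loop append).
import Mathlib
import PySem

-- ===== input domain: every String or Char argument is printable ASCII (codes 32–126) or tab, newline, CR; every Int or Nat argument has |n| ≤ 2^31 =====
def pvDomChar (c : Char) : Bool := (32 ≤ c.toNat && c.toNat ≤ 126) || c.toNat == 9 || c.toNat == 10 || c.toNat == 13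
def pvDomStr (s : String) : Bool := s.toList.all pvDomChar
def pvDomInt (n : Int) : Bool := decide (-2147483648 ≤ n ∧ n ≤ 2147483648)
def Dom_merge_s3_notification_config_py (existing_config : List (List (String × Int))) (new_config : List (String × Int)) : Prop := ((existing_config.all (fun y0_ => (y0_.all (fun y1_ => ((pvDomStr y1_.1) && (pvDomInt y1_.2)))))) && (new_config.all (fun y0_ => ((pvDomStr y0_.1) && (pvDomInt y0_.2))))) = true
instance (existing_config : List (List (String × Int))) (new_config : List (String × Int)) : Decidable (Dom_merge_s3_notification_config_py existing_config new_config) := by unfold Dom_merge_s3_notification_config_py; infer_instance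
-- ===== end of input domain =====

-- B replaces A's fused loop+flag by a two-phase structural recursion (search phase, then replace-only phase); equivalent on Pre_.
-- ===== PORT A =====
-- shared helper: d['LambdaFunctionArn'] as first-match association-list lookup (none = KeyError)
def pvArn (c : List (String × Int)) : Option Int :=
  List.lookup "LambdaFunctionArn" c

def merge_s3_notification_config_py (existing_config : List (List (String × Int))) (new_config : List (String × Int)) : List (List (String × Int)) :=
  let r := existing_config.foldl
    (fun (acc : List (List (String × Int)) × Bool) config =>
      if pvArn config ≠ pvArn new_config then (acc.1 ++ [config], acc.2)
      else (acc.1 ++ [new_config], true))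
    ([], false)
  if !r.2 then r.1 ++ [new_config] else r.1

-- ===== PORT B =====
-- replace-only phase: after the first match, substitute every later matching entry
def pvReplaceRest (new_config : List (String × Int)) : List (List (String × Int)) → List (List (String × Int))
  | [] => []
  | h :: t => (if pvArn h = pvArn new_config then new_config else h) :: pvReplaceRest new_config t

-- search phase: append new_config at the base case; switch phases at the first match
def pvMergeGo (new_config : List (String × Int)) : List (List (String × Int)) → List (List (String × Int))
  | [] => [new_config]
  | h :: t =>
    if pvArn h = pvArn new_config then new_config :: pvReplaceRest new_config t
    else h :: pvMergeGo new_config t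

def merge_s3_notification_config_py_alt (existing_config : List (List (String × Int))) (new_config : List (String × Int)) : List (List (String × Int)) :=
  pvMergeGo new_config existing_config

-- ===== PRECONDITION & SPEC =====
-- Pre_ excludes exactly the inputs where Python A raises KeyError: when existing_config is
-- nonempty, every element and new_config must carry the key 'LambdaFunctionArn'.
def Pre_merge_s3_notification_config_py (existing_config : List (List (String × Int))) (new_config : List (String × Int)) : Prop :=
  existing_config = [] ∨
    ((∀ c ∈ existing_config, (pvArn c).isSome) ∧ (pvArn new_config).isSome)
instance (existing_config : List (List (String × Int))) (new_config : List (String × Int)) : Decidable (Pre_merge_s3_notification_config_py existing_config new_config) := by unfold Pre_merge_s3_notification_config_py; infer_instance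

def pvWitness_merge_s3_notification_config_py : (List (List (String × Int))) × (List (String × Int)) :=
  ([[("LambdaFunctionArn", 1), ("Id", 5)], [("LambdaFunctionArn", 2)]], [("LambdaFunctionArn", 1), ("Id", 7)])

def Spec_merge_s3_notification_config_py (existing_config : List (List (String × Int))) (new_config : List (String × Int)) (out : List (List (String × Int))) : Prop := out = merge_s3_notification_config_py_alt existing_config new_config
instance (existing_config : List (List (String × Int))) (new_config : List (String × Int)) (out : List (List (String × Int))) : Decidable (Spec_merge_s3_notification_config_py existing_config new_config out) := by unfold Spec_merge_s3_notification_config_py; infer_instance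

-- ===== CLAIM (what is proved, stated in full; the proofs are below) =====
def Claim_equal_merge_s3_notification_config_py : Prop := ∀ (existing_config : List (List (String × Int))) (new_config : List (String × Int)), Dom_merge_s3_notification_config_py existing_config new_config → Pre_merge_s3_notification_config_py existing_config new_config → Spec_merge_s3_notification_config_py existing_config new_config (merge_s3_notification_config_py existing_config new_config)

-- ===== LEMMAS AND PROOFS =====
-- A's fold carries (accumulated output, flag); it equals the accumulator extended with
-- the substitution map, with the flag OR-ed with the membership test.
theorem pvFoldEq (new_config : List (String × Int)) :
    ∀ (l : List (List (String × Int))) (acc : List (List (String × Int))) (added : Bool),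
      l.foldl
        (fun (acc : List (List (String × Int)) × Bool) config =>
          if pvArn config ≠ pvArn new_config then (acc.1 ++ [config], acc.2)
          else (acc.1 ++ [new_config], true))
        (acc, added)
      = (acc ++ l.map (fun c => if pvArn c = pvArn new_config then new_config else c),
         added || l.any (fun c => decide (pvArn c = pvArn new_config))) := by
  intro l
  induction l with
  | nil => intro acc added; simp
  | cons h t ih =>
    intro acc added
    by_cases hc : pvArn h = pvArn new_config
    · simp only [List.foldl_cons, hc, ne_eq, not_true_eq_false, if_false, ih]
      simp [hc]
    · simp only [List.foldl_cons, hc, ne_eq, not_false_eq_true, if_true, ih]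
      simp [hc]

theorem pvReplaceRestEq (new_config : List (String × Int)) :
    ∀ l, pvReplaceRest new_config l
      = l.map (fun c => if pvArn c = pvArn new_config then new_config else c) := by
  intro l
  induction l with
  | nil => rfl
  | cons h t ih => simp [pvReplaceRest, ih]

-- characterisation of B's two-phase recursion
theorem pvMergeGoEq (new_config : List (String × Int)) :
    ∀ l, pvMergeGo new_config l
      = if l.any (fun c => decide (pvArn c = pvArn new_config))
        then l.map (fun c => if pvArn c = pvArn new_config then new_config else c)
        else l ++ [new_config] := by
  intro l
  induction l with
  | nil => rfl
  | cons h t ih =>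
    by_cases hc : pvArn h = pvArn new_config
    · simp [pvMergeGo, hc, pvReplaceRestEq]
    · simp only [pvMergeGo, hc, if_false, ih]
      by_cases ht : t.any (fun c => decide (pvArn c = pvArn new_config)) = true
      · simp [hc, ht]
      · simp [hc, ht]

-- ===== VERDICT (by name: the statement is the Claim_ definition above) =====
theorem merge_s3_notification_config_py_spec : Claim_equal_merge_s3_notification_config_py := by
  intro ex new _ _
  unfold Spec_merge_s3_notification_config_py
  unfold merge_s3_notification_config_py merge_s3_notification_config_py_alt
  rw [pvFoldEq, pvMergeGoEq]
  cases hA : ex.any (fun c => decide (pvArn c = pvArn new))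
  · have hno : ∀ c ∈ ex, (if pvArn c = pvArn new then new else c) = c := by
      intro c hc
      exact if_neg (by simpa using List.any_eq_false.mp hA c hc)
    simp [List.map_congr_left hno]
  · simp
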